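-- pv_equiv track=rewrite | github.com/alexhutman/AES | test_aes128.py | hexify
-- ===== SOURCE A (Python) =====
-- def hexify(tokenized_arr):
--     msg_length = len(tokenized_arr)
--     pad_length = 0 if msg_length % 16 == 0 else ((msg_length // 16) + 1) * 16 - msg_length
--
--     hex_arr = []
--     for token in tokenized_arr:
--         hex_arr.append(int(token, 16))
--     for i in range(pad_length):
--         hex_arr.append(0)
--     return hex_arr
-- ===== SOURCE B (Python) =====
-- def hexify(tokenized_arr):
--     out = []
--     start = 0
--     n = len(tokenized_arr)
--     while start < n:
--         block = [int(t, 16) for t in tokenized_arr[start:start + 16]]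
--         out += block + [0] * (16 - len(block))
--         start += 16
--     return out
-- ===== Notes on version B (the rewrite author's own statement) =====
-- stated objective: alternative
-- what changed: Replaces A's two sequential passes (append every parsed token, then append a precomputed global pad count of zeros) with a single while loop over 16-token chunks that converts each chunk and pads only the final partial chunk up to 16 in-chunk, so no global pad length is ever computed.
import Mathlib
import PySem

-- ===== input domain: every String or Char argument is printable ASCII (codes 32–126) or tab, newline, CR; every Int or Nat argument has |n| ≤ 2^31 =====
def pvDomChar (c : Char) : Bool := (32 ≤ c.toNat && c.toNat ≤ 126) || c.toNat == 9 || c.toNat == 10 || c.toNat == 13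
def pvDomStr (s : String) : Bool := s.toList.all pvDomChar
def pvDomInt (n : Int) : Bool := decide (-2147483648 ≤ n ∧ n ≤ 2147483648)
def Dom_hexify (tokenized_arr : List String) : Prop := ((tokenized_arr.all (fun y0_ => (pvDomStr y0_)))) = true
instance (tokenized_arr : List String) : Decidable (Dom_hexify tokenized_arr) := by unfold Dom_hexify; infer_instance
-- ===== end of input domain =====

-- B processes the input in a single while loop over 16-token chunks, padding only the final
-- partial chunk in-chunk, instead of A's append loop over all tokens followed by a separate
-- global padding loop (objective: alternative).


-- ===== PORT A =====
-- int(token, 16): under Pre_hexify every token parses, so the .getD 0 default never fires (A raises there).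
def hexify (tokenized_arr : List String) : List Int :=
  let msgLength : Int := tokenized_arr.length
  let padLength : Int :=
    if PySem.Int.mod msgLength 16 = 0 then 0
    else ((PySem.Int.floordiv msgLength 16) + 1) * 16 - msgLength
  let hexArr : List Int :=
    tokenized_arr.foldl (fun acc token => acc ++ [(PySem.Int.ofStrBase? token 16).getD 0]) []
  (PySem.List.pyRange 0 padLength 1).foldl (fun acc _ => acc ++ [(0 : Int)]) hexArr

-- ===== PORT B =====
-- the while loop: state (out, start); terminates because start grows by 16 towards n
def hexifyAltLoop (ta : List String) (out : List Int) (start : Int) : List Int :=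
  if (start < (ta.length : Int)) then
    let block : List Int :=
      (PySem.List.slice ta (some start) (some (start + 16))).map
        (fun t => (PySem.Int.ofStrBase? t 16).getD 0)
    hexifyAltLoop ta
      (out ++ (block ++ PySem.List.pyRepeat [(0 : Int)] (16 - (block.length : Int))))
      (start + 16)
  else out
  termination_by ((ta.length : Int) - start).toNat
  decreasing_by omega

def hexify_alt (tokenized_arr : List String) : List Int :=
  hexifyAltLoop tokenized_arr [] 0

-- ===== PRECONDITION & SPEC =====
-- Pre_ excludes exactly the inputs with a token int(token,16) cannot parse, where A raises ValueError.
def Pre_hexify (tokenized_arr : List String) : Prop :=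
  (tokenized_arr.all (fun t => (PySem.Int.ofStrBase? t 16).isSome)) = true
instance (tokenized_arr : List String) : Decidable (Pre_hexify tokenized_arr) := by
  unfold Pre_hexify; infer_instance
def pvWitness_hexify : List String := ["1f", " Ff ", "+a", "0x10"]

def Spec_hexify (tokenized_arr : List String) (out : List Int) : Prop := out = hexify_alt tokenized_arr
instance (tokenized_arr : List String) (out : List Int) : Decidable (Spec_hexify tokenized_arr out) := by unfold Spec_hexify; infer_instance

-- ===== CLAIM (what is proved, stated in full; the proofs are below) =====
def Claim_equal_hexify : Prop := ∀ (tokenized_arr : List String), Dom_hexify tokenized_arr → Pre_hexify tokenized_arr → Spec_hexify tokenized_arr (hexify tokenized_arr)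

-- ===== LEMMAS AND PROOFS =====

-- A's first loop is map by appends
theorem pv_foldl_append_map (f : String → Int) :
    ∀ (ta : List String) (acc : List Int),
      ta.foldl (fun a t => a ++ [f t]) acc = acc ++ ta.map f := by
  intro ta
  induction ta with
  | nil => simp
  | cons t ta ih => intro acc; simp [List.foldl, ih]

-- A's second loop appends one zero per range element
theorem pv_foldl_zeros (l : List Int) :
    ∀ (acc : List Int),
      l.foldl (fun a _ => a ++ [(0 : Int)]) acc = acc ++ List.replicate l.length 0 := by
  induction l with
  | nil => simp
  | cons x l ih =>
      intro acc
      simp [List.foldl, ih, List.replicate_succ]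

-- the two pad lengths agree: A's rounded-up-to-16 pad equals (-n) mod 16
theorem pv_pad_eq (n : Nat) :
    (if PySem.Int.mod (n : Int) 16 = 0 then (0 : Int)
     else ((PySem.Int.floordiv (n : Int) 16) + 1) * 16 - (n : Int))
      = PySem.Int.mod (-(n : Int)) 16 := by
  rw [PySem.Int.mod_eq_emod_of_pos (a := (n : Int)) (by norm_num),
      PySem.Int.mod_eq_emod_of_pos (a := -(n : Int)) (by norm_num),
      PySem.Int.floordiv_eq_ediv_of_pos (a := (n : Int)) (by norm_num)]
  omega

-- characterisation of B's while loop
theorem pv_loop_char (ta : List String) (k : Nat) :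
    ∀ (start : Int) (out : List Int), 0 ≤ start → start < (ta.length : Int) →
      ((ta.length : Int) - start).toNat ≤ k →
      hexifyAltLoop ta out start
        = out ++ (ta.drop start.toNat).map (fun t => (PySem.Int.ofStrBase? t 16).getD 0)
            ++ List.replicate (PySem.Int.mod (start - (ta.length : Int)) 16).toNat 0 := by
  induction k with
  | zero => intro start out h0 hlt hk; omega
  | succ k ih =>
      intro start out h0 hlt hk
      rw [hexifyAltLoop, if_pos hlt]
      have h16 : (start + 16).toNat - start.toNat = 16 := by omega
      simp only [PySem.List.slice_toNat ta h0 (show (0:Int) ≤ start + 16 by omega), h16]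
      set f : String → Int := fun t => (PySem.Int.ofStrBase? t 16).getD 0 with hf
      set rest := ta.drop start.toNat with hrest
      have hrestlen : (rest.length : Int) = (ta.length : Int) - start := by
        simp [hrest, List.length_drop]; omega
      by_cases hsmall : (ta.length : Int) ≤ start + 16
      · -- final chunk: the recursive call exits immediately
        have htake : rest.take 16 = rest := List.take_of_length_le (by omega)
        rw [hexifyAltLoop, if_neg (by omega)]
        rw [htake, PySem.List.pyRepeat_singleton]
        have hpad : ((16 : Int) - ((rest.map f).length : Int)).toNat
            = (PySem.Int.mod (start - (ta.length : Int)) 16).toNat := by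
          rw [PySem.Int.mod_eq_emod_of_pos (by norm_num)]
          simp only [List.length_map]
          omega
        rw [hpad, List.append_assoc]
      · -- full chunk: pad is empty, recurse
        have hlen16 : (rest.take 16).length = 16 := by
          rw [List.length_take]; omega
        have hpad0 : PySem.List.pyRepeat [(0 : Int)] (16 - (((rest.take 16).map f).length : Int)) = [] := by
          rw [PySem.List.pyRepeat_singleton, List.length_map, hlen16]
          norm_num
        rw [hpad0, List.append_nil]
        rw [ih (start + 16) _ (by omega) (by omega) (by omega)]
        have hdrop : ta.drop (start + 16).toNat = rest.drop 16 := by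
          rw [hrest, List.drop_drop]
          congr 1
          omega
        rw [hdrop]
        have hsplit : (rest.take 16).map f ++ (rest.drop 16).map f = rest.map f := by
          rw [← List.map_append, List.take_append_drop]
        have hmod : (PySem.Int.mod (start + 16 - (ta.length : Int)) 16).toNat
            = (PySem.Int.mod (start - (ta.length : Int)) 16).toNat := by
          rw [PySem.Int.mod_eq_emod_of_pos (by norm_num),
              PySem.Int.mod_eq_emod_of_pos (by norm_num)]
          omega
        rw [hmod, ← hsplit]
        simp [List.append_assoc]

theorem pv_alt_char (ta : List String) :
    hexify_alt ta
      = ta.map (fun t => (PySem.Int.ofStrBase? t 16).getD 0)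
          ++ List.replicate (PySem.Int.mod (-(ta.length : Int)) 16).toNat 0 := by
  unfold hexify_alt
  by_cases h : ta = []
  · subst h
    rw [hexifyAltLoop]
    simp [PySem.Int.mod]
  · have hpos : 0 < (ta.length : Int) := by
      have := List.length_pos_of_ne_nil h
      omega
    rw [pv_loop_char ta ((ta.length : Int) - 0).toNat 0 [] le_rfl hpos le_rfl]
    simp

-- ===== VERDICT (by name: the statement is the Claim_ definition above) =====
theorem hexify_spec : Claim_equal_hexify := by
  intro ta _ _
  unfold Spec_hexify hexify
  simp only []
  rw [pv_pad_eq ta.length]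
  rw [pv_foldl_append_map (fun t => (PySem.Int.ofStrBase? t 16).getD 0) ta [], pv_foldl_zeros]
  rw [PySem.List.length_pyRange_one]
  rw [pv_alt_char]
  simp
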